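-- pv_equiv track=rewrite | github.com/guo560/BundleRec | data/gen_bundle_sequence.py | create_fixed_sequences
-- ===== SOURCE A (Python) =====
-- def create_fixed_sequences(values: list, sequence_length):
--     """padding with 0."""
--     sequences = []
--     seq = [0 for _ in range(sequence_length)]
--     for end_index in range(len(values)):
--         valid_len = min(sequence_length, end_index + 1)
--         seq[sequence_length - valid_len:sequence_length] = values[end_index + 1 - valid_len:end_index + 1]
--         sequences.append(seq.copy())
--     return sequences
-- ===== SOURCE B (Python) =====
-- def create_fixed_sequences(values: list, sequence_length):
--     """padding with 0."""
--     padded = [0] * (sequence_length - 1) + list(values)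
--     return [padded[i:i + sequence_length] for i in range(len(values))]
-- ===== Notes on version B (the rewrite author's own statement) =====
-- stated objective: idiomatic
-- what changed: Instead of mutating a shared padded buffer with per-step slice assignment and copying it each iteration, B builds the zero-prepadded list once and returns uniform length-L slices padded[i:i+L].
-- outside the precondition, e.g. on create_fixed_sequences([1, 2, 3], -1): A returns [[], [], []], B returns [[1, 2], [], []]
import Mathlib
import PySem

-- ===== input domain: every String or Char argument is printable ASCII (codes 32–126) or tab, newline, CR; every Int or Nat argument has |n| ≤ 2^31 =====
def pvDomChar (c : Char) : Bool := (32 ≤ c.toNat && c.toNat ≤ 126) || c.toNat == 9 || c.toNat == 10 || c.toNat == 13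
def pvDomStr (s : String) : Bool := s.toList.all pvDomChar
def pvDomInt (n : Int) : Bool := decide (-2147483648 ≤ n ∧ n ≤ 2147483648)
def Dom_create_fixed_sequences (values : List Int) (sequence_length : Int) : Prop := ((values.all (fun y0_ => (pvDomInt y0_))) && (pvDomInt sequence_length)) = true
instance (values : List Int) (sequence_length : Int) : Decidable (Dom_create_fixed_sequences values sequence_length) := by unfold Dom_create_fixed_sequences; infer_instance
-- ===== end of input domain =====

-- B replaces A's in-place slice assignment into a shared buffer by uniform slices over a
-- once-prepadded list (idiomatic; same asymptotic cost).

-- ===== PORT A =====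
-- exact model of Python's step-1 slice assignment 'l[a:b] = xs': l[:a] ++ xs ++ l[max(a,b):]
def pySetSlice (l : List Int) (a b : Int) (xs : List Int) : List Int :=
  PySem.List.slice l none (some a) ++ xs ++ PySem.List.slice l (some (max a b)) none

def create_fixed_sequences (values : List Int) (sequence_length : Int) : List (List Int) :=
  let seq0 := (PySem.List.pyRange 0 sequence_length 1).map (fun _ => (0 : Int))
  ((PySem.List.pyRange 0 (values.length : Int) 1).foldl
    (fun (st : List (List Int) × List Int) e =>
      let valid_len := min sequence_length (e + 1)
      let seq := pySetSlice st.2 (sequence_length - valid_len) sequence_length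
        (PySem.List.slice values (some (e + 1 - valid_len)) (some (e + 1)))
      (st.1 ++ [seq], seq))
    (([] : List (List Int)), seq0)).1

-- ===== PORT B =====
def create_fixed_sequences_alt (values : List Int) (sequence_length : Int) : List (List Int) :=
  let padded := List.replicate (sequence_length - 1).toNat (0 : Int) ++ values
  (List.range values.length).map (fun (i : Nat) =>
    PySem.List.slice padded (some (i : Int)) (some ((i : Int) + sequence_length)))

-- ===== PRECONDITION & SPEC =====
-- Pre_ restricts to the natural domain of nonnegative window lengths: for a (absurd) negative
-- sequence_length A's n empty lists are an accident of its empty shared buffer, while B's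
-- negative slice stops yield other values.
def Pre_create_fixed_sequences (values : List Int) (sequence_length : Int) : Prop :=
  0 ≤ sequence_length
instance (values : List Int) (sequence_length : Int) : Decidable (Pre_create_fixed_sequences values sequence_length) := by unfold Pre_create_fixed_sequences; infer_instance

def pvWitness_create_fixed_sequences : List Int × Int := ([1, 2, 3], 2)

def Spec_create_fixed_sequences (values : List Int) (sequence_length : Int) (out : List (List Int)) : Prop := out = create_fixed_sequences_alt values sequence_length
instance (values : List Int) (sequence_length : Int) (out : List (List Int)) : Decidable (Spec_create_fixed_sequences values sequence_length out) := by unfold Spec_create_fixed_sequences; infer_instance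

-- ===== CLAIM (what is proved, stated in full; the proofs are below) =====
def Claim_equal_create_fixed_sequences : Prop := ∀ (values : List Int) (sequence_length : Int), Dom_create_fixed_sequences values sequence_length → Pre_create_fixed_sequences values sequence_length → Spec_create_fixed_sequences values sequence_length (create_fixed_sequences values sequence_length)

-- ===== LEMMAS AND PROOFS =====

-- the window produced after the first k values have been consumed
def pvW (values : List Int) (l k : Nat) : List Int :=
  ((List.replicate l (0 : Int)) ++ values.take k).drop k

lemma pvW_eq (values : List Int) (l k : Nat) :
    pvW values l k = List.replicate (l - k) (0 : Int) ++ (values.take k).drop (k - l) := by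
  simp [pvW, List.drop_append]

lemma pvW_length (values : List Int) (l k : Nat) (hk : k ≤ values.length) :
    (pvW values l k).length = l := by
  simp [pvW]
  omega

lemma pvW_succ (values : List Int) (l k : Nat) :
    (pvW values l k).take (l - min l (k+1)) ++
      (values.drop (k + 1 - min l (k+1))).take (min l (k+1)) = pvW values l (k+1) := by
  rcases Nat.lt_or_ge (k+1) l with h | h
  · rw [pvW_eq, pvW_eq, show min l (k+1) = k+1 by omega, show k - l = 0 by omega,
      show k + 1 - (k+1) = 0 by omega, show k + 1 - l = 0 by omega]
    simp only [List.drop_zero]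
    rw [List.take_append_of_le_length (by simp; omega), List.take_replicate,
      show min (l - (k+1)) (l - k) = l - (k+1) by omega]
  · rw [pvW_eq, pvW_eq, show min l (k+1) = l by omega, show l - l = 0 by omega,
      show l - (k+1) = 0 by omega]
    simp only [List.take_zero, List.nil_append, List.replicate_zero]
    rw [List.drop_take, show k + 1 - (k + 1 - l) = l by omega]

-- seq after the step with end_index = k, starting from the invariant window
lemma step_eq (values : List Int) (L : Int) (hL : 0 ≤ L) (k : Nat) (hk : k < values.length) :
    pySetSlice (pvW values L.toNat k) (L - min L ((k : Int) + 1)) L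
      (PySem.List.slice values (some ((k : Int) + 1 - min L ((k : Int) + 1))) (some ((k : Int) + 1)))
      = pvW values L.toNat (k + 1) := by
  have hv : (0 : Int) ≤ min L ((k : Int) + 1) := by omega
  have hlen : (pvW values L.toNat k).length = L.toNat :=
    pvW_length values L.toNat k (le_of_lt hk)
  have hmax : max (L - min L ((k : Int) + 1)) L = L := by omega
  unfold pySetSlice
  rw [hmax, PySem.List.slice_to _ (by omega), PySem.List.slice_from _ hL,
    PySem.List.slice_toNat _ (by omega) (by omega),
    show List.drop L.toNat (pvW values L.toNat k) = [] from
      List.drop_of_length_le (le_of_eq hlen),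
    List.append_nil,
    show ((k : Int) + 1).toNat - ((k : Int) + 1 - min L ((k : Int) + 1)).toNat
        = min L.toNat (k+1) by omega,
    show ((k : Int) + 1 - min L ((k : Int) + 1)).toNat = k + 1 - min L.toNat (k+1) by omega,
    show (L - min L ((k : Int) + 1)).toNat = L.toNat - min L.toNat (k+1) by omega]
  exact pvW_succ values L.toNat k

lemma seq0_eq (values : List Int) (L : Int) :
    (PySem.List.pyRange 0 L 1).map (fun _ => (0 : Int)) = pvW values L.toNat 0 := by
  simp [PySem.List.pyRange_one, pvW, Function.comp_def, List.map_const']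

lemma foldA (values : List Int) (L : Int) (hL : 0 ≤ L) (k : Nat) (hk : k ≤ values.length) :
    (PySem.List.pyRange 0 (k : Int) 1).foldl
      (fun (st : List (List Int) × List Int) e =>
        let valid_len := min L (e + 1)
        let seq := pySetSlice st.2 (L - valid_len) L
          (PySem.List.slice values (some (e + 1 - valid_len)) (some (e + 1)))
        (st.1 ++ [seq], seq))
      (([] : List (List Int)), pvW values L.toNat 0)
    = ((List.range k).map (fun i => pvW values L.toNat (i + 1)), pvW values L.toNat k) := by
  induction k with
  | zero => simp [PySem.List.pyRange_one_eq_nil]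
  | succ k ih =>
    have hk' : k ≤ values.length := by omega
    have hc : ((k + 1 : Nat) : Int) = (k : Int) + 1 := by push_cast; ring
    rw [hc, PySem.List.pyRange_one_succ_right (by positivity), List.foldl_append, ih hk']
    simp only [List.foldl_cons, List.foldl_nil]
    rw [step_eq values L hL k (by omega)]
    simp [List.range_succ]

lemma altB (values : List Int) (L : Int) (hL : 0 ≤ L) (i : Nat) (hi : i < values.length) :
    PySem.List.slice (List.replicate (L - 1).toNat (0 : Int) ++ values)
      (some (i : Int)) (some ((i : Int) + L)) = pvW values L.toNat (i + 1) := by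
  rw [PySem.List.slice_toNat _ (by omega) (by omega)]
  have e1 : ((i : Int)).toNat = i := by omega
  have e2 : ((i : Int) + L).toNat - ((i : Int)).toNat = L.toNat := by omega
  rw [e2, e1]
  rcases Nat.eq_zero_or_pos L.toNat with h0 | hpos
  · simp [h0, pvW_eq]
  · -- L.toNat = (L-1).toNat + 1
    have hL1 : L.toNat = (L-1).toNat + 1 := by omega
    have key : List.replicate L.toNat (0 : Int) ++ values.take (i+1)
        = (0 : Int) :: (List.replicate (L-1).toNat (0 : Int) ++ values.take (i+1)) := by
      rw [hL1]; rfl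
    have hlen : i ≤ (List.replicate (L-1).toNat (0 : Int) ++ values.take (i+1)).length := by
      simp; omega
    calc ((List.replicate (L - 1).toNat (0 : Int) ++ values).drop i).take L.toNat
        = ((List.replicate (L - 1).toNat (0 : Int) ++ values.take (i+1) ++ values.drop (i+1)).drop i).take L.toNat := by
          rw [List.append_assoc, List.take_append_drop]
      _ = (((List.replicate (L - 1).toNat (0 : Int) ++ values.take (i+1)).drop i) ++ values.drop (i+1)).take L.toNat := by
          rw [List.drop_append_of_le_length hlen]
      _ = ((List.replicate (L - 1).toNat (0 : Int) ++ values.take (i+1)).drop i) := by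
          apply List.take_left'
          simp
          omega
      _ = pvW values L.toNat (i + 1) := by
          unfold pvW
          rw [key]
          rfl

-- ===== VERDICT (by name: the statement is the Claim_ definition above) =====
theorem create_fixed_sequences_spec : Claim_equal_create_fixed_sequences := by
  intro values L _ hL
  have hA : create_fixed_sequences values L
      = (List.range values.length).map (fun i => pvW values L.toNat (i + 1)) := by
    unfold create_fixed_sequences
    dsimp only
    rw [seq0_eq values L, foldA values L hL values.length le_rfl]
  have hB : create_fixed_sequences_alt values L
      = (List.range values.length).map (fun i => pvW values L.toNat (i + 1)) := by
    unfold create_fixed_sequences_alt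
    dsimp only
    apply List.map_congr_left
    intro i hi
    exact altB values L hL i (List.mem_range.mp hi)
  unfold Spec_create_fixed_sequences
  rw [hA, hB]
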